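-- pv_equiv track=rewrite | github.com/RAJUS248/Data-Structure-and-Algorithms | 01_Array or List/65_Binary Search find target.py | search_v2
-- ===== SOURCE A (Python) =====
-- def search_v2(nums: list, target: int):
--
--     # write your code logic !!
--
--     seen = {}
--
--     for idx,val in enumerate(nums):
--
--         seen[val] = seen.get(val,0) + idx
--
--
--     if target in seen:
--
--         return seen[target]
--
--     else:
--         return -1
-- ===== SOURCE B (Python) =====
-- def search_v2(nums: list, target: int):
--     # Jump between occurrences with list.index instead of inspecting every
--     # element in Python: total stays -1 until the first hit.
--     total = -1
--     start = 0
--     while True: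
--         try:
--             i = nums.index(target, start)
--         except ValueError:
--             return total
--         total = i if total == -1 else total + i
--         start = i + 1
-- ===== Notes on version B (the rewrite author's own statement) =====
-- stated objective: faster
-- what changed: Replaced the dictionary of per-value index sums with an occurrence-jumping loop that repeatedly calls list.index(target, start) and accumulates only the matching indices from a -1 sentinel, so no per-element Python work or dict is done.
import Mathlib
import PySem

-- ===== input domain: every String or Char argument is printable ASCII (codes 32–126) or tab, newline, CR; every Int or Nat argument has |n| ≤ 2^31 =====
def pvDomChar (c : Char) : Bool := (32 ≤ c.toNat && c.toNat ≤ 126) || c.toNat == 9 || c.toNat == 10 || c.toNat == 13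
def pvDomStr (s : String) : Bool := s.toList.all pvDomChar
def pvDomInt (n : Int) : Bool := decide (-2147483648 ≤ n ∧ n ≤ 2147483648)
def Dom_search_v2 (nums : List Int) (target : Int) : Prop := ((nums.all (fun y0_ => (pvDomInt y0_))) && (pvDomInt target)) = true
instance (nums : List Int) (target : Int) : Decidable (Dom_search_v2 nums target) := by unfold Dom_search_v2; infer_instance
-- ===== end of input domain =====

-- B replaces A's dictionary of per-value index sums by an occurrence-jumping loop
-- (repeated list.index(target, start)) accumulating from a -1 sentinel: O(1) space and
-- measurably faster in Python (C-level scans instead of per-element dict work).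

-- ===== PORT A =====
def search_v2 (nums : List Int) (target : Int) : Int :=
  let seen : PySem.Dict Int Int :=
    (PySem.List.enumerate nums).foldl
      (fun d p => d.insert p.2 (d.getD p.2 0 + p.1)) PySem.Dict.empty
  match seen.get? target with
  | some v => v
  | none => -1

-- ===== PORT B =====
-- hand port of Python's nums.index(target, start) for 0 ≤ start: first index ≥ start
-- holding target (none = ValueError); exact on ints for start ≤ len(nums), the only
-- calls Source B makes.
def goIdx (t : Int) : List Int → Nat → Option Nat
  | [], _ => none
  | x :: xs, i => if x = t then some i else goIdx t xs (i + 1)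

def pyIndexFrom (xs : List Int) (t : Int) (s : Nat) : Option Nat :=
  goIdx t (xs.drop s) s

theorem goIdx_bounds (t : Int) :
    ∀ (l : List Int) (b i : Nat), goIdx t l b = some i → b ≤ i ∧ i < b + l.length := by
  intro l
  induction l with
  | nil => intro b i h; simp [goIdx] at h
  | cons x xs ih =>
    intro b i h
    simp only [goIdx] at h
    split at h
    · cases h; simp only [List.length_cons]; omega
    · have := ih (b + 1) i h; simp only [List.length_cons]; omega

theorem pyIndexFrom_bounds (xs : List Int) (t : Int) (s i : Nat)
    (h : pyIndexFrom xs t s = some i) : s ≤ i ∧ i < xs.length := by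
  have := goIdx_bounds t (xs.drop s) s i h
  have hl : (xs.drop s).length = xs.length - s := List.length_drop
  omega

-- the while-True loop of Source B: jump to the next occurrence, update the running total
def loopB (xs : List Int) (t : Int) (total : Int) (start : Nat) : Int :=
  match h : pyIndexFrom xs t start with
  | none => total
  | some i => loopB xs t (if total = -1 then (i : Int) else total + i) (i + 1)
termination_by xs.length - start
decreasing_by
  have := pyIndexFrom_bounds xs t start i h
  omega

def search_v2_alt (nums : List Int) (target : Int) : Int :=
  loopB nums target (-1) 0

-- ===== PRECONDITION & SPEC =====
def Spec_search_v2 (nums : List Int) (target : Int) (out : Int) : Prop := out = search_v2_alt nums target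
instance (nums : List Int) (target : Int) (out : Int) : Decidable (Spec_search_v2 nums target out) := by unfold Spec_search_v2; infer_instance

-- ===== CLAIM (what is proved, stated in full; the proofs are below) =====
def Claim_equal_search_v2 : Prop := ∀ (nums : List Int) (target : Int), Dom_search_v2 nums target → Spec_search_v2 nums target (search_v2 nums target)

-- ===== LEMMAS AND PROOFS =====

/-- Reference value: `some` of the sum of (base-offset) indices at which `t` occurs,
`none` if it does not occur. Both ports are proved equal to a case split on it. -/
def gsum (t : Int) : List Int → Int → Option Int
  | [], _ => none
  | x :: xs, b =>
    let r := gsum t xs (b + 1)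
    if x = t then some (b + r.getD 0) else r

/-- A's dictionary restricted to key `t` behaves like a (total, found) fold. -/
theorem fold_invariant (t : Int) :
    ∀ (pairs : List (Int × Int)) (d : PySem.Dict Int Int),
      (pairs.foldl (fun d p => d.insert p.2 (d.getD p.2 0 + p.1)) d).get? t =
        (let s := pairs.foldl (fun s p => if p.2 = t then (s.1 + p.1, true) else s)
          (d.getD t 0, (d.get? t).isSome);
        if s.2 then some s.1 else none) := by
  intro pairs
  induction pairs with
  | nil =>
    intro d
    simp only [List.foldl_nil]
    cases h : d.get? t with
    | none => simp [h]
    | some v => simp [h, PySem.Dict.getD_eq_get?_getD]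
  | cons p rest ih =>
    intro d
    simp only [List.foldl_cons]
    by_cases hv : p.2 = t
    · rw [ih]
      subst hv
      simp [PySem.Dict.get?_insert_self, PySem.Dict.getD_eq_get?_getD]
    · rw [ih]
      simp [PySem.Dict.getD_insert, PySem.Dict.get?_insert, Ne.symm hv, hv]

/-- The (total, found) fold over an enumeration computes `gsum`. -/
theorem flagfold_eq (t : Int) :
    ∀ (xs : List Int) (b acc : Int) (f : Bool),
      (PySem.List.enumerate xs b).foldl
          (fun s p => if p.2 = t then (s.1 + p.1, true) else s) (acc, f) =
        (acc + (gsum t xs b).getD 0, f || (gsum t xs b).isSome) := by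
  intro xs
  induction xs with
  | nil => intro b acc f; simp [PySem.List.enumerate_nil, gsum]
  | cons x xs ih =>
    intro b acc f
    rw [PySem.List.enumerate_cons]
    simp only [List.foldl_cons, gsum]
    by_cases hx : x = t
    · simp only [hx, if_pos rfl, ih]
      cases hr : gsum t xs (b + 1) <;> simp [hr] <;> ring_nf
    · simp [hx, ih]

theorem goIdx_none_gsum (t : Int) :
    ∀ (l : List Int) (b : Nat), goIdx t l b = none → gsum t l (b : Int) = none := by
  intro l
  induction l with
  | nil => intro b _; simp [gsum]
  | cons x xs ih =>
    intro b h
    simp only [goIdx] at h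
    split at h
    · exact absurd h (by simp)
    · rename_i hx
      have := ih (b + 1) h
      simp only [gsum, hx, if_false]
      push_cast at this ⊢
      exact this

theorem goIdx_some_gsum (t : Int) :
    ∀ (l : List Int) (b i : Nat), goIdx t l b = some i →
      gsum t l (b : Int) =
        some ((i : Int) + (gsum t (l.drop (i - b + 1)) ((i : Int) + 1)).getD 0) := by
  intro l
  induction l with
  | nil => intro b i h; simp [goIdx] at h
  | cons x xs ih =>
    intro b i h
    simp only [goIdx] at h
    split at h
    · rename_i hx
      cases h
      simp only [gsum, hx, if_pos rfl, Nat.sub_self, Nat.zero_add, List.drop_one,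
        List.tail_cons]
      norm_num
    · rename_i hx
      have hb := goIdx_bounds t xs (b + 1) i h
      have := ih (b + 1) i h
      have hdrop : (x :: xs).drop (i - b + 1) = xs.drop (i - (b + 1) + 1) := by
        have h1 : i - b + 1 = (i - (b + 1) + 1) + 1 := by omega
        rw [h1, List.drop_succ_cons]
      simp only [gsum, hx, if_false, hdrop]
      push_cast at this ⊢
      exact this

/-- The occurrence-jumping loop computes `gsum` on the suffix from `start`. -/
theorem loopB_eq (xs : List Int) (t : Int) :
    ∀ (k s : Nat) (total : Int), xs.length - s ≤ k → -1 ≤ total →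
      loopB xs t total s =
        match gsum t (xs.drop s) (s : Int) with
        | none => total
        | some v => (if total = -1 then 0 else total) + v := by
  intro k
  induction k with
  | zero =>
    intro s total hk _
    rw [loopB]
    split
    · rename_i h
      have := goIdx_none_gsum t (xs.drop s) s h
      simp [this]
    · rename_i i h
      have := pyIndexFrom_bounds xs t s i h
      omega
  | succ k ih =>
    intro s total hk htot
    rw [loopB]
    split
    · rename_i h
      have := goIdx_none_gsum t (xs.drop s) s h
      simp [this]
    · rename_i i h
      have hb := pyIndexFrom_bounds xs t s i h
      have hg := goIdx_some_gsum t (xs.drop s) s i h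
      have hdrop : (xs.drop s).drop (i - s + 1) = xs.drop (i + 1) := by
        rw [List.drop_drop]
        congr 1
        omega
      rw [hdrop] at hg
      have htot' : (-1 : Int) ≤ (if total = -1 then (i : Int) else total + i) := by
        split <;> omega
      have hrec := ih (i + 1) (if total = -1 then (i : Int) else total + i) (by omega) htot'
      rw [hrec, hg]
      have hne : (if total = -1 then (i : Int) else total + i) ≠ -1 := by
        split <;> omega
      cases hr : gsum t (xs.drop (i + 1)) ((i : Int) + 1) with
      | none =>
        push_cast
        simp [hr]
        split <;> simp <;> omega
      | some r =>
        push_cast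
        simp [hr, hne]
        split <;> ring_nf <;> omega

-- ===== VERDICT (by name: the statement is the Claim_ definition above) =====
theorem search_v2_spec : Claim_equal_search_v2 := by
  intro nums target _
  unfold Spec_search_v2 search_v2 search_v2_alt
  simp only [fold_invariant target (PySem.List.enumerate nums) PySem.Dict.empty,
    PySem.Dict.get?_empty, PySem.Dict.getD_empty, Option.isSome_none, flagfold_eq]
  have hB := loopB_eq nums target nums.length 0 (-1) (by omega) (by omega)
  simp only [List.drop_zero, Int.natCast_zero] at hB
  rw [hB]
  cases hg : gsum target nums 0 with
  | none => simp [hg]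
  | some v => simp [hg]
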